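-- pv_equiv track=rewrite | github.com/Sabotazhnyk/Path_Algorithms | Task_1/algorithm_li.py | start_point
-- ===== SOURCE A (Python) =====
-- def start_point(Place):
--     n = 0
--     for i in Place:
--         n += 1
--         m = 0
--         for j in i:
--             m += 1
--             if j == 1:
--                 point_s = (Place.index(i),i.index(j))
--     return point_s
-- ===== SOURCE B (Python) =====
-- def start_point(Place):
--     for i in reversed(Place):
--         if 1 in i:
--             point_s = (Place.index(i), i.index(1))
--             break
--     return point_s
-- ===== Notes on version B (the rewrite author's own statement) =====
-- stated objective: simpler
-- what changed: B scans the rows bottom-up and stops at the first row containing a 1, instead of A's exhaustive nested double loop that overwrites the result for every 1-cell; the inner cell loop disappears (replaced by one membership test).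
import Mathlib
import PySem

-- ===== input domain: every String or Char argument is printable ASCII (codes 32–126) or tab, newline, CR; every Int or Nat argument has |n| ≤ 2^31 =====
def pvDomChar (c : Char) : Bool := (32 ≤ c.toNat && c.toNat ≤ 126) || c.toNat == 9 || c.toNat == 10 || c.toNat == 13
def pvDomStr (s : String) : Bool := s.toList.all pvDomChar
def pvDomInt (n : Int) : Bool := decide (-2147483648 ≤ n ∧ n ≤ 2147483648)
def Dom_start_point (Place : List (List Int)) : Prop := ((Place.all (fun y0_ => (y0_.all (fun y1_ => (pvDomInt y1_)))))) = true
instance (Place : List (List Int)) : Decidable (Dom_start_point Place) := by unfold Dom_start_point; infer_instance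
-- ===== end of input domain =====

-- B replaces A's exhaustive nested overwrite loop by a bottom-up scan that stops at the first row containing a 1 (simpler; same value lookups Place.index / row.index).


-- ===== PORT A =====
-- shared helper: the pair (Place.index(i), i.index(1)); Python .index = first match (PySem.List.index?).
-- Both ports only apply it when i ∈ Place and 1 ∈ i, so the lookups always succeed; getD 0 is never the fallback there.
def pvPt (Place : List (List Int)) (i : List Int) : Int × Int :=
  (((PySem.List.index? Place i).getD 0 : Nat), ((PySem.List.index? i 1).getD 0 : Nat))

def start_point (Place : List (List Int)) : Int × Int :=
  -- n = 0; for i in Place: n += 1; m = 0; for j in i: m += 1; if j == 1: point_s = (Place.index(i), i.index(j))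
  let st := Place.foldl (fun (st : Int × Option (Int × Int)) i =>
    let n := st.1 + 1
    let inner := i.foldl (fun (st2 : Int × Option (Int × Int)) j =>
      let m := st2.1 + 1
      (m, if j == 1 then some (pvPt Place i) else st2.2)) ((0 : Int), st.2)
    (n, inner.2)) ((0 : Int), none)
  -- return point_s  (UnboundLocalError when no 1 exists: excluded by Pre_)
  match st.2 with
  | some p => p
  | none => (0, 0)

-- ===== PORT B =====
def start_point_alt (Place : List (List Int)) : Int × Int :=
  -- for i in reversed(Place): if 1 in i: point_s = (Place.index(i), i.index(1)); break
  match Place.reverse.find? (fun i => decide ((1 : Int) ∈ i)) with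
  | some i => pvPt Place i
  | none => (0, 0)  -- UnboundLocalError in Python: excluded by Pre_

-- ===== PRECONDITION & SPEC =====
-- Pre_ excludes grids with no 1-cell, on which both A and B raise UnboundLocalError.
def Pre_start_point (Place : List (List Int)) : Prop := ∃ i ∈ Place, (1 : Int) ∈ i
instance (Place : List (List Int)) : Decidable (Pre_start_point Place) := by unfold Pre_start_point; infer_instance
def pvWitness_start_point : List (List Int) := [[0, 0], [0, 1, 0]]
def Spec_start_point (Place : List (List Int)) (out : Int × Int) : Prop := out = start_point_alt Place
instance (Place : List (List Int)) (out : Int × Int) : Decidable (Spec_start_point Place out) := by unfold Spec_start_point; infer_instance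

-- ===== CLAIM (what is proved, stated in full; the proofs are below) =====
def Claim_equal_start_point : Prop := ∀ (Place : List (List Int)), Dom_start_point Place → Pre_start_point Place → Spec_start_point Place (start_point Place)

-- ===== LEMMAS AND PROOFS =====

-- A's inner loop over a row: final point_s = pvPt if the row contains a 1, else unchanged.
theorem pv_inner (Place : List (List Int)) (i : List Int) :
    ∀ (row : List Int) (m0 : Int) (acc : Option (Int × Int)),
      (row.foldl (fun (st2 : Int × Option (Int × Int)) j =>
        (st2.1 + 1, if j == 1 then some (pvPt Place i) else st2.2)) (m0, acc)).2
      = if (1 : Int) ∈ row then some (pvPt Place i) else acc := by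
  intro row
  induction row with
  | nil => intro m0 acc; simp
  | cons j t ih =>
    intro m0 acc
    simp only [List.foldl_cons]
    rw [ih]
    by_cases hj : j = (1 : Int)
    · simp only [hj, List.mem_cons, true_or, if_true, beq_self_eq_true, ite_true]
      split_ifs <;> rfl
    · simp [hj, Ne.symm hj]

-- A's outer loop keeps the LAST row containing a 1 = the first such row of the reversed list.
theorem pv_outer (Place : List (List Int)) :
    ∀ (l : List (List Int)) (n0 : Int) (acc : Option (Int × Int)),
      (l.foldl (fun (st : Int × Option (Int × Int)) i =>
        (st.1 + 1,
          (i.foldl (fun (st2 : Int × Option (Int × Int)) j =>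
            (st2.1 + 1, if j == 1 then some (pvPt Place i) else st2.2)) ((0 : Int), st.2)).2))
        (n0, acc)).2
      = match l.reverse.find? (fun i => decide ((1 : Int) ∈ i)) with
        | some i => some (pvPt Place i)
        | none => acc := by
  intro l
  induction l with
  | nil => intro n0 acc; simp
  | cons x t ih =>
    intro n0 acc
    rw [List.foldl_cons, ih]
    rw [List.reverse_cons, List.find?_append]
    cases hf : t.reverse.find? (fun i => decide ((1 : Int) ∈ i)) with
    | some i => simp
    | none =>
      simp only [Option.none_or]
      rw [pv_inner]
      by_cases hx : (1 : Int) ∈ x <;> simp [hx, List.find?]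

-- ===== VERDICT (by name: the statement is the Claim_ definition above) =====
theorem start_point_spec : Claim_equal_start_point := by
  intro Place _ _
  unfold Spec_start_point start_point start_point_alt
  simp only [pv_outer Place Place 0 none]
  cases Place.reverse.find? (fun i => decide ((1 : Int) ∈ i)) <;> rfl
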